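-- pv_equiv track=rewrite | github.com/Mads-PeterVC/ase-fork | ase/cli/template.py | header_alias
-- ===== SOURCE A (Python) =====
-- def header_alias(h):
--     if h == 'i':
--         h = 'index'
--     elif h == 'an':
--         h = 'atomic #'
--     elif h == 't':
--         h = 'tag'
--     elif h == 'el':
--         h = 'element'
--     elif h[0] == 'd':
--         h = h.replace('d', 'Δ')
--     elif h[0] == 'r':
--         h = 'rank ' + header_alias(h[1:])
--     elif h[0] == 'a':
--         h = h.replace('a', '<')
--         h += '>'
--     return h
-- ===== SOURCE B (Python) =====
-- def header_alias(h):
--     # Strip the whole leading run of 'r's at once (no alias key starts with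
--     # 'r', so A's recursion peels exactly this run), then resolve the
--     # remainder via a lookup table, falling back to per-character rewriting.
--     rest = h.lstrip('r')
--     prefix = 'rank ' * (len(h) - len(rest))
--     table = {'i': 'index', 'an': 'atomic #', 't': 'tag', 'el': 'element'}
--     if rest in table:
--         return prefix + table[rest]
--     c = rest[0]
--     if c == 'd':
--         return prefix + ''.join('Δ' if ch == 'd' else ch for ch in rest)
--     if c == 'a':
--         return prefix + ''.join('<' if ch == 'a' else ch for ch in rest) + '>'
--     return prefix + rest
-- ===== Notes on version B (the rewrite author's own statement) =====
-- stated objective: simpler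
-- what changed: Replaces A's recursion that peels one leading 'r' per call with a single lstrip('r') giving a 'rank '*k prefix, an alias lookup table for the exact keys, and per-character rewriting (join over a generator) instead of str.replace for the 'd'/'a' cases.
import Mathlib
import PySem

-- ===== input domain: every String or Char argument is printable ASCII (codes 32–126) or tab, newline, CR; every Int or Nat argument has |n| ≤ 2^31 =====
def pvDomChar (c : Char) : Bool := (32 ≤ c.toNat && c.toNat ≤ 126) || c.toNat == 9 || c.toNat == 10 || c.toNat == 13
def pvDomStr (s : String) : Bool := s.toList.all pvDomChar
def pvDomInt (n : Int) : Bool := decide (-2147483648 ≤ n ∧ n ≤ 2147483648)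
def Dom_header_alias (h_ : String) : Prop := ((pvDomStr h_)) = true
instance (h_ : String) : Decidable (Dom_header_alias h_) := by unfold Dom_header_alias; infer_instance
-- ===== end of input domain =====

-- B replaces A's recursive 'r'-peeling by one lstrip('r'), a lookup table for the
-- exact alias keys, and per-character rewriting for 'd'/'a' (objective: simpler).

-- ===== PORT A =====
-- Literal port of A's recursion on the character list; the [] case is where
-- Python raises IndexError on h[0] (excluded by Pre_), value there is arbitrary.
def headerAliasCore : List Char → List Char
  | [] => []
  | c :: t =>
    if c :: t = ['i'] then "index".toList
    else if c :: t = ['a', 'n'] then "atomic #".toList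
    else if c :: t = ['t'] then "tag".toList
    else if c :: t = ['e', 'l'] then "element".toList
    else if c = 'd' then PySem.Chars.replace (c :: t) ['d'] ['Δ']
    else if c = 'r' then "rank ".toList ++ headerAliasCore t
    else if c = 'a' then PySem.Chars.replace (c :: t) ['a'] ['<'] ++ ['>']
    else c :: t

def header_alias (h_ : String) : String := String.ofList (headerAliasCore h_.toList)

-- ===== PORT B =====
-- Source B's alias dict as an association list.
def headerAliasTable : List (List Char × List Char) :=
  [("i".toList, "index".toList), ("an".toList, "atomic #".toList),
   ("t".toList, "tag".toList), ("el".toList, "element".toList)]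

-- Source B's resolution of the stripped remainder: table lookup, else per-character
-- rewriting ([] = Python IndexError on rest[0], excluded by Pre_).
def headerAliasResolve (rest : List Char) : List Char :=
  match headerAliasTable.lookup rest with
  | some v => v
  | none =>
    match rest with
    | [] => []
    | c :: t =>
      if c = 'd' then (c :: t).map (fun ch => if ch = 'd' then 'Δ' else ch)
      else if c = 'a' then ((c :: t).map (fun ch => if ch = 'a' then '<' else ch)) ++ ['>']
      else c :: t

-- h.lstrip('r') is dropWhile (= 'r'); 'rank ' * k is flatten (replicate k "rank ")
def header_alias_alt (h_ : String) : String :=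
  let rest := h_.toList.dropWhile (· = 'r')
  let pfx := (List.replicate (h_.toList.length - rest.length) "rank ".toList).flatten
  String.ofList (pfx ++ headerAliasResolve rest)

-- ===== PRECONDITION & SPEC =====
-- Pre_ excludes exactly the inputs where A raises IndexError: '' and strings of
-- only 'r's (B raises there too).
def Pre_header_alias (h_ : String) : Prop := (h_.toList.any (fun c => c != 'r')) = true
instance (h_ : String) : Decidable (Pre_header_alias h_) := by unfold Pre_header_alias; infer_instance
def pvWitness_header_alias : String := "ri"

def Spec_header_alias (h_ : String) (out : String) : Prop := out = header_alias_alt h_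
instance (h_ : String) (out : String) : Decidable (Spec_header_alias h_ out) := by unfold Spec_header_alias; infer_instance

-- ===== CLAIM (what is proved, stated in full; the proofs are below) =====
def Claim_equal_header_alias : Prop := ∀ (h_ : String), Dom_header_alias h_ → Pre_header_alias h_ → Spec_header_alias h_ (header_alias h_)

-- ===== LEMMAS AND PROOFS =====

-- str.replace with a one-char pattern and one-char replacement is a map.
lemma replace_go_single (p q : Char) : ∀ (fuel : Nat) (l acc : List Char), l.length ≤ fuel →
    PySem.Chars.replace.go [p] [q] fuel l acc
      = acc.reverse ++ l.map (fun c => if c = p then q else c) := by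
  intro fuel
  induction fuel with
  | zero =>
    intro l acc hl
    have : l = [] := List.length_eq_zero_iff.mp (Nat.le_zero.mp hl)
    subst this
    simp [PySem.Chars.replace.go]
  | succ n ih =>
    intro l acc hl
    cases l with
    | nil => simp [PySem.Chars.replace.go]
    | cons c t =>
      simp only [PySem.Chars.replace.go]
      by_cases hc : c = p
      · subst hc
        have hpre : [c].isPrefixOf (c :: t) = true := by simp [List.isPrefixOf]
        rw [if_pos hpre]
        simp only [List.length_singleton, List.drop_one, List.tail_cons, List.reverse_singleton]
        rw [ih t ([q] ++ acc) (by simpa using Nat.le_of_succ_le_succ hl)]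
        simp
      · have hpre : [p].isPrefixOf (c :: t) = false := by
          simp [List.isPrefixOf]
          exact fun h => absurd h.symm hc
        rw [if_neg (by simp [hpre])]
        rw [ih t (c :: acc) (by simpa using Nat.le_of_succ_le_succ hl)]
        simp [hc]

lemma replace_single (p q : Char) (l : List Char) :
    PySem.Chars.replace l [p] [q] = l.map (fun c => if c = p then q else c) := by
  have := replace_go_single p q l.length l [] (le_refl _)
  simpa [PySem.Chars.replace] using this

-- On a non-'r'-headed remainder, A's final dispatch and B's table-plus-map
-- resolution agree.
lemma core_eq_resolve (c : Char) (t : List Char) (hc : c ≠ 'r') :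
    headerAliasCore (c :: t) = headerAliasResolve (c :: t) := by
  by_cases h1 : c :: t = ['i']
  · rw [h1]; decide
  · by_cases h2 : c :: t = ['a', 'n']
    · rw [h2]; decide
    · by_cases h3 : c :: t = ['t']
      · rw [h3]; decide
      · by_cases h4 : c :: t = ['e', 'l']
        · rw [h4]; decide
        · have hlook : headerAliasTable.lookup (c :: t) = none := by
            simp only [headerAliasTable, List.lookup]
            have b1 : (c == 'i' && t.isEmpty) = false := by
              by_cases h : c = 'i'
              · subst h; simp_all
              · simp [h]
            have b2 : (c == 'a' && t == ['n']) = false := by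
              by_cases h : c = 'a'
              · subst h; simp_all
              · simp [h]
            have b3 : (c == 't' && t.isEmpty) = false := by
              by_cases h : c = 't'
              · subst h; simp_all
              · simp [h]
            have b4 : (c == 'e' && t == ['l']) = false := by
              by_cases h : c = 'e'
              · subst h; simp_all
              · simp [h]
            simp [b1, b2, b3, b4]
          unfold headerAliasCore headerAliasResolve
          rw [hlook]
          simp only [if_neg h1, if_neg h2, if_neg h3, if_neg h4, if_neg hc]
          by_cases hd : c = 'd'
          · simp [hd, replace_single]
          · by_cases ha : c = 'a'
            · simp [ha, replace_single]
            · simp [hd, ha]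

-- A's recursion equals B's prefix-plus-resolve decomposition.
lemma headerAliasCore_eq (l : List Char) (h : ∃ c ∈ l, c ≠ 'r') :
    headerAliasCore l =
      (List.replicate (l.length - (l.dropWhile (· = 'r')).length) "rank ".toList).flatten
        ++ headerAliasResolve (l.dropWhile (· = 'r')) := by
  induction l with
  | nil => simp at h
  | cons c t ih =>
    by_cases hc : c = 'r'
    · subst hc
      obtain ⟨x, hx, hxr⟩ := h
      have hxt : x ∈ t := by
        rcases List.mem_cons.mp hx with hq | hq
        · exact absurd hq hxr
        · exact hq
      have ht : ∃ c ∈ t, c ≠ 'r' := ⟨x, hxt, hxr⟩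
      have hkey : headerAliasCore ('r' :: t) = "rank ".toList ++ headerAliasCore t := by
        simp [headerAliasCore]
      rw [hkey, ih ht]
      have hdl : (t.dropWhile (· = 'r')).length ≤ t.length :=
        List.length_dropWhile_le _ _
      have hk : ('r' :: t).length - (t.dropWhile (· = 'r')).length
          = (t.length - (t.dropWhile (· = 'r')).length) + 1 := by
        simp only [List.length_cons]; omega
      rw [List.dropWhile_cons_of_pos (by decide), hk, List.replicate_succ]
      simp
    · rw [List.dropWhile_cons_of_neg (by simpa using hc)]
      simp only [Nat.sub_self, List.replicate_zero, List.flatten_nil, List.nil_append]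
      exact core_eq_resolve c t hc

-- ===== VERDICT (by name: the statement is the Claim_ definition above) =====
theorem header_alias_spec : Claim_equal_header_alias := by
  intro h_ _ hpre
  have hpre' : ∃ c ∈ h_.toList, c ≠ 'r' := by
    simpa using List.any_eq_true.mp hpre
  unfold Spec_header_alias header_alias header_alias_alt
  simp only []
  rw [headerAliasCore_eq h_.toList hpre']
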